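-- pv_equiv track=rewrite | github.com/murilo-1234/winegod-app | backend/tools/resolver.py | _collapse_initials
-- ===== SOURCE A (Python) =====
-- def _collapse_initials(name_norm):
--     """Collapse single-letter words into next word.
--
--     'd eugenio' → 'deugenio', 'j p chenet' → 'jp chenet'.
--     Ajuda match quando DB tem 'D.Eugenio' (→ 'deugenio') e OCR le 'D. Eugenio' (→ 'd eugenio').
--     """
--     tokens = name_norm.split()
--     result = []
--     i = 0
--     while i < len(tokens):
--         if len(tokens[i]) == 1 and i + 1 < len(tokens):
--             result.append(tokens[i] + tokens[i + 1])
--             i += 2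
--         else:
--             result.append(tokens[i])
--             i += 1
--     return ' '.join(result)
-- ===== SOURCE B (Python) =====
-- def _collapse_initials(name_norm):
--     """Collapse single-letter words into next word (single pass with a pending-initial accumulator)."""
--     result = []
--     pending = None
--     for tok in name_norm.split():
--         if pending is not None:
--             result.append(pending + tok)
--             pending = None
--         elif len(tok) == 1:
--             pending = tok
--         else:
--             result.append(tok)
--     if pending is not None:
--         result.append(pending)
--     return ' '.join(result)
-- ===== Notes on version B (the rewrite author's own statement) =====
-- stated objective: simpler
-- what changed: Replaced A's index-based while loop with lookahead tokens[i+1] and skip-by-2 by a single left-to-right for loop over the tokens carrying a pending-initial accumulator (the last unmerged one-character token) that is merged into the next token.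
import Mathlib
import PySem

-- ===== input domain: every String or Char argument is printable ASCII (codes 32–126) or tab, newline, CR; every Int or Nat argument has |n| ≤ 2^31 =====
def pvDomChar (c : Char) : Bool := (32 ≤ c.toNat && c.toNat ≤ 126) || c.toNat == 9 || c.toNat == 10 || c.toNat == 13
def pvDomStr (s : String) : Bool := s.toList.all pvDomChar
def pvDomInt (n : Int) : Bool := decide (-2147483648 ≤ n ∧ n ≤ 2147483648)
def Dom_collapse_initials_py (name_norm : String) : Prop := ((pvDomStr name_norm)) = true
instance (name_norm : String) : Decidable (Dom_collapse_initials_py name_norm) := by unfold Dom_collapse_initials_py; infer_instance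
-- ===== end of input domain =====

-- B changes A's index-based while loop (lookahead, skip-by-2) into a single left-to-right
-- pass carrying a pending single-letter token; same return value, no speed claim (objective: simpler).

-- ===== PORT A =====
-- A's while loop over token indices, transcribed as recursion on the token list:
-- the 'i += 2' branch consumes two tokens, the 'i += 1' branch one.
def pvLoopA : List (List Char) → List (List Char)
  | [] => []
  | [t] => [t]
  | t :: u :: rest =>
    if t.length = 1 then (t ++ u) :: pvLoopA rest
    else t :: pvLoopA (u :: rest)

def collapse_initials_py (name_norm : String) : String :=
  String.ofList (PySem.Chars.join [' '] (pvLoopA (PySem.Chars.split₀ name_norm.toList)))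

-- ===== PORT B =====
-- B's single pass: state = (result so far, pending single-letter token or none).
def pvStepB (st : List (List Char) × Option (List Char)) (tok : List Char) :
    List (List Char) × Option (List Char) :=
  match st.2 with
  | some p => (st.1 ++ [p ++ tok], none)
  | none => if tok.length = 1 then (st.1, some tok) else (st.1 ++ [tok], none)

-- B's final flush: append the pending token, if any.
def pvFlushB (st : List (List Char) × Option (List Char)) : List (List Char) :=
  match st.2 with
  | some p => st.1 ++ [p]
  | none => st.1

def collapse_initials_py_alt (name_norm : String) : String :=
  String.ofList (PySem.Chars.join [' ']
    (pvFlushB ((PySem.Chars.split₀ name_norm.toList).foldl pvStepB ([], none))))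

-- ===== PRECONDITION & SPEC =====
def Spec_collapse_initials_py (name_norm : String) (out : String) : Prop := out = collapse_initials_py_alt name_norm
instance (name_norm : String) (out : String) : Decidable (Spec_collapse_initials_py name_norm out) := by unfold Spec_collapse_initials_py; infer_instance

-- ===== CLAIM (what is proved, stated in full; the proofs are below) =====
def Claim_equal_collapse_initials_py : Prop := ∀ (name_norm : String), Dom_collapse_initials_py name_norm → Spec_collapse_initials_py name_norm (collapse_initials_py name_norm)

-- ===== LEMMAS AND PROOFS =====

-- Loop invariant: B's fold, started with no pending token, produces A's loop output
-- appended to the accumulated result.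
theorem pvFold_eq_loopA (ts : List (List Char)) :
    ∀ acc : List (List Char), pvFlushB (ts.foldl pvStepB (acc, none)) = acc ++ pvLoopA ts := by
  induction ts using pvLoopA.induct with
  | case1 => intro acc; simp [pvLoopA, pvFlushB]
  | case2 t =>
    intro acc
    simp only [List.foldl, pvStepB, pvLoopA]
    split_ifs <;> simp [pvFlushB]
  | case3 t u rest h ih =>
    intro acc
    simp only [List.foldl, pvStepB, h, if_pos, pvLoopA, ih]
    simp
  | case4 t u rest h ih =>
    intro acc
    have := ih (acc ++ [t])
    simp only [List.foldl, pvStepB, h] at this ⊢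
    simp only [if_false, pvLoopA, h]
    simpa using this

-- ===== VERDICT (by name: the statement is the Claim_ definition above) =====
theorem collapse_initials_py_spec : Claim_equal_collapse_initials_py := by
  intro name_norm _
  unfold Spec_collapse_initials_py collapse_initials_py collapse_initials_py_alt
  rw [pvFold_eq_loopA]
  simp
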